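-- pv_equiv track=rewrite | github.com/fora22/CodingTest | fora22/Source/Programmers/Stack_Queue/기능개발.py | solution
-- ===== SOURCE A (Python) =====
-- import math as m
-- from collections import deque
--
-- def solution(progresses, speeds):
--     dueTime = [m.ceil((100 - progresses[i]) / speeds[i]) for i in range(len(progresses))]
--
--     q = deque(dueTime)
--     answer = []
--     cnt = 1
--     due = q.popleft()
--     while(len(q) != 0):
--         if due < q[0]:
--             answer.append(cnt)
--             due = q[0]
--             cnt = 0
--         else:
--             q.popleft()
--             cnt += 1
--
--     answer.append(cnt)
--
--     return answer
-- ===== SOURCE B (Python) =====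
-- def solution(progresses, speeds):
--     # due[i] = ceil((100 - progresses[i]) / speeds[i]), by exact integer ceiling division
--     due = [-((progresses[i] - 100) // speeds[i]) for i in range(len(progresses))]
--     # running prefix maximum of due: the day each task actually ships
--     mx, pref = due[0], []
--     for d in due:
--         mx = max(mx, d)
--         pref.append(mx)
--     # consecutive equal ship-days form one batch; pref is nondecreasing, so
--     # counting each distinct value (in first-occurrence order) gives the batch sizes
--     return [pref.count(v) for v in dict.fromkeys(pref)]
-- ===== Notes on version B (the rewrite author's own statement) =====
-- stated objective: idiomatic
-- what changed: Replaces the deque peek/pop counting loop by a prefix-maximum table (each task's actual ship day) followed by counting each distinct ship day in first-occurrence order via dict.fromkeys + list.count, and computes the ceiling with exact integer division instead of float math.ceil.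
import Mathlib
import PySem

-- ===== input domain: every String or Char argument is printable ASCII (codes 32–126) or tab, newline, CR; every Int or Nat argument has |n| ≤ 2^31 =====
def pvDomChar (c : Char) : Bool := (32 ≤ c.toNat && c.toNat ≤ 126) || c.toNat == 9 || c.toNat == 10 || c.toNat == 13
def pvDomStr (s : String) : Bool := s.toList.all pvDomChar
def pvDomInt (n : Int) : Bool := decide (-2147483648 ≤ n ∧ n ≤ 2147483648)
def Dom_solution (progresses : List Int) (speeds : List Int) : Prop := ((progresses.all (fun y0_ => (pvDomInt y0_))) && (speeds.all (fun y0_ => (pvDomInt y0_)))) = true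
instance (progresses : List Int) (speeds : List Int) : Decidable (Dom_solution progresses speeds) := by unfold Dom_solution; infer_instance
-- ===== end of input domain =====

-- B groups tasks by prefix-maximum ship day instead of A's deque peek/pop loop (idiomatic, not faster).

-- ===== PORT A =====
-- m.ceil((100-p)/s): exact on Dom (|100-p| < 2^53, so the float quotient never rounds across an integer)
def pyCeilDiv (a b : Int) : Int := -(PySem.Int.floordiv (-a) b)

-- the while loop over the deque; state = (q, answer, cnt, due)
def solutionLoop (q : List Int) (answer : List Int) (cnt : Int) (due : Int) : List Int :=
  match q with
  | [] => answer ++ [cnt]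
  | x :: rest =>
      if due < x then solutionLoop (x :: rest) (answer ++ [cnt]) 0 x
      else solutionLoop rest answer (cnt + 1) due
termination_by 2 * q.length + (match q with | [] => 0 | x :: _ => if due < x then 1 else 0)
decreasing_by
  · simp_all
  · cases rest
    · simp_all
    · simp_all
      split_ifs <;> omega

def solution (progresses : List Int) (speeds : List Int) : List Int :=
  let dueTime := (List.range progresses.length).map (fun i =>
    pyCeilDiv (100 - PySem.List.pyGetD progresses (i : Int) 0) (PySem.List.pyGetD speeds (i : Int) 0))
  match dueTime with
  | [] => []               -- Python: q.popleft() raises IndexError here; excluded by Pre_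
  | d :: q => solutionLoop q [] 1 d

-- ===== PORT B =====
def solution_alt (progresses : List Int) (speeds : List Int) : List Int :=
  let due := (List.range progresses.length).map (fun i =>
    -(PySem.Int.floordiv (PySem.List.pyGetD progresses (i : Int) 0 - 100) (PySem.List.pyGetD speeds (i : Int) 0)))
  -- mx = due[0] raises IndexError on empty input in Python; excluded by Pre_
  let pref := (due.foldl (fun s d => let mx := max s.1 d; (mx, s.2 ++ [mx])) (due.headD 0, ([] : List Int))).2
  (PySem.List.dedup pref).map (fun v => (PySem.List.count pref v : Int))

-- ===== PRECONDITION & SPEC =====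
-- Pre_ excludes exactly the inputs on which Python A raises: empty progresses (IndexError on
-- popleft), speeds shorter than progresses (IndexError), and a zero speed among the used ones
-- (ZeroDivisionError). B raises on all of these too.
def Pre_solution (progresses : List Int) (speeds : List Int) : Prop :=
  progresses ≠ [] ∧ progresses.length ≤ speeds.length ∧
    ∀ x ∈ speeds.take progresses.length, x ≠ 0
instance (progresses : List Int) (speeds : List Int) : Decidable (Pre_solution progresses speeds) := by
  unfold Pre_solution; infer_instance
def pvWitness_solution : List Int × List Int := ([93, 30, 55], [1, 30, 5])
def Spec_solution (progresses : List Int) (speeds : List Int) (out : List Int) : Prop := out = solution_alt progresses speeds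
instance (progresses : List Int) (speeds : List Int) (out : List Int) : Decidable (Spec_solution progresses speeds out) := by unfold Spec_solution; infer_instance

-- ===== CLAIM (what is proved, stated in full; the proofs are below) =====
def Claim_equal_solution : Prop := ∀ (progresses : List Int) (speeds : List Int), Dom_solution progresses speeds → Pre_solution progresses speeds → Spec_solution progresses speeds (solution progresses speeds)

-- ===== LEMMAS AND PROOFS =====

-- the batch sizes A's loop produces, as a structural recursion
def groupsSpec (q : List Int) (cnt : Int) (due : Int) : List Int :=
  match q with
  | [] => [cnt]
  | x :: rest => if due < x then cnt :: groupsSpec rest 1 x else groupsSpec rest (cnt + 1) due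

theorem solutionLoop_eq (q : List Int) : ∀ (ans : List Int) (cnt due : Int),
    solutionLoop q ans cnt due = ans ++ groupsSpec q cnt due := by
  induction q with
  | nil => intro ans cnt due; simp [solutionLoop, groupsSpec]
  | cons x rest ih =>
      intro ans cnt due
      by_cases h : due < x
      · rw [solutionLoop]; simp only [h, if_pos]
        rw [solutionLoop]; simp only [lt_irrefl, if_neg, not_false_iff]
        rw [ih, groupsSpec]; simp [h]
  -- after the append branch the head equals due, so the next step pops
      · rw [solutionLoop]; simp only [h, if_neg, not_false_iff]
        rw [ih, groupsSpec]; simp [h]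

-- running prefix maxima of r starting from accumulator m (excluding m itself)
def scanAcc (r : List Int) (m : Int) : List Int :=
  match r with
  | [] => []
  | d :: r' => max m d :: scanAcc r' (max m d)

theorem foldl_pref_eq (r : List Int) : ∀ (m : Int) (acc : List Int),
    (r.foldl (fun s d => let mx := max s.1 d; (mx, s.2 ++ [mx])) (m, acc)).2
      = acc ++ scanAcc r m := by
  induction r with
  | nil => intro m acc; simp [scanAcc]
  | cons d r' ih => intro m acc; simp only [List.foldl, scanAcc]; rw [ih]; simp

theorem scanAcc_ge (r : List Int) : ∀ (m : Int), ∀ e ∈ scanAcc r m, m ≤ e := by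
  induction r with
  | nil => intro m e he; simp [scanAcc] at he
  | cons d r' ih =>
      intro m e he
      simp only [scanAcc, List.mem_cons] at he
      rcases he with rfl | he
      · exact le_max_left _ _
      · exact le_trans (le_max_left m d) (ih (max m d) e he)

def dedupCount (L : List Int) : List Int :=
  (PySem.List.dedup L).map (fun v => (PySem.List.count L v : Int))

theorem foldl_add_replicate (n : Nat) (m : Int) : ∀ (s : PySem.Set Int), m ∈ s →
    List.foldl PySem.Set.add s (List.replicate n m) = s := by
  induction n with
  | zero => intro s _; simp
  | succ k ih =>
      intro s hs
      rw [List.replicate_succ, List.foldl_cons]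
      have : PySem.Set.add s m = s := by
        simp [PySem.Set.add, PySem.Set.contains, hs]
      rw [this]; exact ih s hs

theorem foldl_add_cons_of_not_mem (L : List Int) : ∀ (s : List Int) (a : Int), a ∉ L →
    List.foldl PySem.Set.add (a :: s) L = a :: List.foldl PySem.Set.add s L := by
  induction L with
  | nil => intro s a _; simp
  | cons x L' ih =>
      intro s a ha
      have hxa : x ≠ a := fun h => ha (by simp [h])
      rw [List.foldl_cons, List.foldl_cons]
      have : PySem.Set.add (a :: s) x = a :: PySem.Set.add s x := by
        simp only [PySem.Set.add, PySem.Set.contains, List.contains_cons]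
        have : (x == a) = false := by simp [hxa]
        simp only [this, Bool.false_or]
        split_ifs <;> rfl
      rw [this, ih _ a (fun h => ha (List.mem_cons_of_mem _ h))]

theorem dedup_replicate_append (n : Nat) (m : Int) (L : List Int) :
    PySem.List.dedup (List.replicate (n + 1) m ++ L)
      = List.foldl PySem.Set.add [m] L := by
  rw [PySem.List.dedup_eq_ofList, PySem.Set.ofList_eq_foldl, List.foldl_append]
  congr 1
  rw [List.replicate_succ, List.foldl_cons]
  have h0 : PySem.Set.add ([] : PySem.Set Int) m = [m] := by
    simp [PySem.Set.add, PySem.Set.contains]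
  rw [h0, foldl_add_replicate n m [m] (by simp)]

theorem dedupCount_replicate_of_not_mem (n : Nat) (m : Int) (L : List Int) (hm : m ∉ L) :
    dedupCount (List.replicate (n + 1) m ++ L) = ((n : Int) + 1) :: dedupCount L := by
  unfold dedupCount
  rw [dedup_replicate_append, foldl_add_cons_of_not_mem L [] m hm]
  rw [← PySem.Set.ofList_eq_foldl, ← PySem.List.dedup_eq_ofList]
  simp only [List.map_cons, List.cons.injEq]
  constructor
  · have : PySem.List.count (List.replicate (n + 1) m ++ L) m = n + 1 := by
      simp [PySem.List.count_eq, List.count_append,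
        List.count_eq_zero_of_not_mem hm]
    rw [this]; push_cast; ring
  · apply List.map_congr_left
    intro v hv
    have hvL : v ∈ L := (PySem.List.mem_dedup L v).1 hv
    have hvm : v ≠ m := fun h => hm (h ▸ hvL)
    have hc : PySem.List.count (List.replicate (n + 1) m ++ L) v = PySem.List.count L v := by
      simp [PySem.List.count_eq, List.count_append, List.count_replicate, Ne.symm hvm]
    rw [hc]

theorem dedupCount_replicate (n : Nat) (m : Int) :
    dedupCount (List.replicate (n + 1) m) = [(n : Int) + 1] := by
  have := dedupCount_replicate_of_not_mem n m [] (by simp)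
  simpa [dedupCount, PySem.List.dedup] using this

theorem key_lemma (r : List Int) : ∀ (m : Int) (n : Nat),
    dedupCount (List.replicate (n + 1) m ++ scanAcc r m) = groupsSpec r ((n : Int) + 1) m := by
  induction r with
  | nil =>
      intro m n
      simp only [scanAcc, List.append_nil, groupsSpec]
      exact dedupCount_replicate n m
  | cons d r' ih =>
      intro m n
      by_cases h : m < d
      · have hmax : max m d = d := max_eq_right (le_of_lt h)
        have hnot : m ∉ scanAcc (d :: r') m := by
          intro hmem
          simp only [scanAcc, hmax, List.mem_cons] at hmem
          rcases hmem with heq | hmem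
          · omega
          · have := scanAcc_ge r' d m hmem; omega
        rw [dedupCount_replicate_of_not_mem n m _ hnot]
        simp only [scanAcc, hmax]
        have : (d :: scanAcc r' d) = List.replicate (0 + 1) d ++ scanAcc r' d := by simp
        rw [this, ih d 0]
        simp [groupsSpec, h]
      · have hmax : max m d = m := max_eq_left (not_lt.1 h)
        have : List.replicate (n + 1) m ++ scanAcc (d :: r') m
            = List.replicate (n + 1 + 1) m ++ scanAcc r' m := by
          simp only [scanAcc, hmax]
          calc List.replicate (n + 1) m ++ (m :: scanAcc r' m)
              = (List.replicate (n + 1) m ++ [m]) ++ scanAcc r' m := by simp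
            _ = List.replicate (n + 1 + 1) m ++ scanAcc r' m := by rw [← List.replicate_succ']
        rw [this, ih m (n + 1)]
        simp only [groupsSpec, h, if_neg, not_false_iff]
        norm_cast

theorem due_lists_eq (progresses speeds : List Int) :
    (List.range progresses.length).map (fun i =>
        pyCeilDiv (100 - PySem.List.pyGetD progresses (i : Int) 0) (PySem.List.pyGetD speeds (i : Int) 0))
      = (List.range progresses.length).map (fun i =>
        -(PySem.Int.floordiv (PySem.List.pyGetD progresses (i : Int) 0 - 100) (PySem.List.pyGetD speeds (i : Int) 0))) := by
  apply List.map_congr_left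
  intro i _
  simp [pyCeilDiv, neg_sub]

-- ===== VERDICT (by name: the statement is the Claim_ definition above) =====
theorem solution_spec : Claim_equal_solution := by
  intro progresses speeds _ hpre
  obtain ⟨hne, _, _⟩ := hpre
  unfold Spec_solution solution solution_alt
  rw [due_lists_eq]
  set due := (List.range progresses.length).map (fun i =>
    -(PySem.Int.floordiv (PySem.List.pyGetD progresses (i : Int) 0 - 100) (PySem.List.pyGetD speeds (i : Int) 0))) with hdue
  have hlen : due ≠ [] := by
    cases hp : progresses with
    | nil => exact absurd hp hne
    | cons p ps =>
        simp only [hdue, ne_eq, List.map_eq_nil_iff, hp]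
        simp only [List.length_cons]
        simp
        exact ⟨0, Nat.zero_le _⟩
  cases hd : due with
  | nil => exact absurd hd hlen
  | cons d q =>
      simp only
      rw [solutionLoop_eq, List.nil_append]
      have hfold : ((d :: q).foldl (fun s e => let mx := max s.1 e; (mx, s.2 ++ [mx]))
          ((d :: q).headD 0, ([] : List Int))).2 = d :: scanAcc q d := by
        simp only [List.headD_cons, List.foldl_cons, max_self]
        rw [foldl_pref_eq]
        simp
      rw [hfold]
      have : (d :: scanAcc q d) = List.replicate (0 + 1) d ++ scanAcc q d := by simp
      rw [show (PySem.List.dedup (d :: scanAcc q d)).map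
            (fun v => (PySem.List.count (d :: scanAcc q d) v : Int))
          = dedupCount (d :: scanAcc q d) from rfl, this, key_lemma]
      simp
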